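-- pv_equiv track=rewrite | github.com/SudarshanKhot605/Round-1B | structure_analysis.py | _merge_two_fragments
-- ===== SOURCE A (Python) =====
-- def _merge_two_fragments(text1: str, text2: str) -> str:
--     """Try to merge two potentially overlapping fragments"""
--     # Check for suffix-prefix overlap
--     max_overlap = min(len(text1), len(text2)) // 2
--
--     for overlap_len in range(max_overlap, 0, -1):
--         if text1[-overlap_len:].lower() == text2[:overlap_len].lower():
--             # Found overlap
--             merged = text1 + text2[overlap_len:]
--             return merged
--
--     # Check for prefix-suffix overlap (reverse)
--     for overlap_len in range(max_overlap, 0, -1):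
--         if text2[-overlap_len:].lower() == text1[:overlap_len].lower():
--             # Found overlap
--             merged = text2 + text1[overlap_len:]
--             return merged
--
--     # Check if one is contained in the other
--     if text1.lower() in text2.lower():
--         return text2
--     elif text2.lower() in text1.lower():
--         return text1
--
--     return text1  # No merge possible
-- ===== SOURCE B (Python) =====
-- def _best_overlap(a: str, b: str, cap: int) -> int:
--     """Largest k <= cap with a[-k:] == b[:k], found in O(n) with the KMP
--     prefix function of b + '\x00' + a (the separator never occurs in the texts)."""
--     s = b + "\x00" + a
--     pi = [0] * len(s)
--     k = 0
--     for i in range(1, len(s)):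
--         while k and s[i] != s[k]:
--             k = pi[k - 1]
--         if s[i] == s[k]:
--             k += 1
--         pi[i] = k
--     while k > cap:
--         k = pi[k - 1]
--     return k
--
--
-- def _merge_two_fragments(text1: str, text2: str) -> str:
--     a = text1.lower()
--     b = text2.lower()
--     cap = min(len(a), len(b)) // 2
--     k1 = _best_overlap(a, b, cap)
--     if k1:
--         return text1 + text2[k1:]
--     k2 = _best_overlap(b, a, cap)
--     if k2:
--         return text2 + text1[k2:]
--     if a in b:
--         return text2
--     if b in a:
--         return text1
--     return text1
-- ===== Notes on version B (the rewrite author's own statement) =====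
-- stated objective: faster
-- what changed: Replaces the quadratic descending scan over all candidate overlap lengths (slicing and lowercasing on every iteration) by a KMP prefix-function pass over lowercased text2 + '\x00' + text1, whose border chain yields the longest case-insensitive suffix/prefix overlap capped at min(len)//2 in linear time.
import Mathlib
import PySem

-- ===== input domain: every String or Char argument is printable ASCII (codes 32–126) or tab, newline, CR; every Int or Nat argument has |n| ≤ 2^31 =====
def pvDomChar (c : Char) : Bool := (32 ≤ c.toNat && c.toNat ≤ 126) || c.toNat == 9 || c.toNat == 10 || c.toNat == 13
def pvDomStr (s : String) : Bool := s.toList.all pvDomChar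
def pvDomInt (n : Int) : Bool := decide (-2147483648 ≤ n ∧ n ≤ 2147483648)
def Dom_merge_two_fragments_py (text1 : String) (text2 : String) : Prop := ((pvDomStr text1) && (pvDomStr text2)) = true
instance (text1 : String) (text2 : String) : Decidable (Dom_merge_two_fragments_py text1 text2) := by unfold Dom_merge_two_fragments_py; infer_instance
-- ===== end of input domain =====

-- B replaces A's quadratic descending scan over candidate overlap lengths by a linear KMP
-- prefix-function pass over lowercased text2 + '\x00' + text1 (objective: faster, asymptotic).

-- ===== PORT A =====
-- the loop test: text1[-overlap_len:].lower() == text2[:overlap_len].lower()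
def pvCondA (t1 t2 : String) (k : Int) : Bool :=
  PySem.Str.lower (PySem.Str.slice t1 (some (-k)) none) == PySem.Str.lower (PySem.Str.slice t2 none (some k))

-- 'for overlap_len in range(max_overlap, 0, -1): if …: return text1 + text2[overlap_len:]'
def pvLoopA (t1 t2 : String) : List Int → Option String
  | [] => none
  | k :: rest =>
    if pvCondA t1 t2 k then some (t1 ++ PySem.Str.slice t2 (some k) none)
    else pvLoopA t1 t2 rest

def merge_two_fragments_py (text1 : String) (text2 : String) : String :=
  let max_overlap : Int := PySem.Int.floordiv (min (PySem.Str.len text1) (PySem.Str.len text2)) 2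
  match pvLoopA text1 text2 (PySem.List.pyRange max_overlap 0 (-1)) with
  | some merged => merged
  | none =>
    match pvLoopA text2 text1 (PySem.List.pyRange max_overlap 0 (-1)) with
    | some merged => merged
    | none =>
      if PySem.Str.isIn (PySem.Str.lower text1) (PySem.Str.lower text2) then text2
      else if PySem.Str.isIn (PySem.Str.lower text2) (PySem.Str.lower text1) then text1
      else text1

-- ===== PORT B =====
-- 'while k and s[i] != s[k]: k = pi[k - 1]'  (fuel = the initial k bounds the strictly decreasing jumps)
def pvKmpWhile (s : List Char) (pi : List Nat) (c : Char) : Nat → Nat → Nat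
  | 0, k => k
  | fuel + 1, k => if k ≠ 0 ∧ s.getD k ' ' ≠ c then pvKmpWhile s pi c fuel (pi.getD (k - 1) 0) else k

-- 'while k > cap: k = pi[k - 1]'
def pvChainDown (pi : List Nat) (cap : Nat) : Nat → Nat → Nat
  | 0, k => k
  | fuel + 1, k => if cap < k then pvChainDown pi cap fuel (pi.getD (k - 1) 0) else k

-- 'pi = [0]*len(s); k = 0; for i in range(1, len(s)): …; pi[i] = k'
def pvKmpScan (s : List Char) : List Nat × Nat :=
  (List.range' 1 (s.length - 1)).foldl
    (fun st i =>
      let c := s.getD i ' '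
      let w := pvKmpWhile s st.1 c st.2 st.2
      let k := if s.getD w ' ' = c then w + 1 else w
      (st.1.set i k, k))
    (List.replicate s.length 0, 0)

def pvBestOverlap (a b : List Char) (cap : Nat) : Nat :=
  let s := b ++ '\x00' :: a
  let st := pvKmpScan s
  pvChainDown st.1 cap st.2 st.2

def merge_two_fragments_py_alt (text1 : String) (text2 : String) : String :=
  let a := PySem.Chars.lower text1.toList
  let b := PySem.Chars.lower text2.toList
  let cap := min a.length b.length / 2
  let k1 := pvBestOverlap a b cap
  if k1 ≠ 0 then String.ofList (text1.toList ++ text2.toList.drop k1)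
  else
    let k2 := pvBestOverlap b a cap
    if k2 ≠ 0 then String.ofList (text2.toList ++ text1.toList.drop k2)
    else if PySem.Chars.isIn a b then text2
    else if PySem.Chars.isIn b a then text1
    else text1

-- ===== PRECONDITION & SPEC =====
def Spec_merge_two_fragments_py (text1 : String) (text2 : String) (out : String) : Prop := out = merge_two_fragments_py_alt text1 text2
instance (text1 : String) (text2 : String) (out : String) : Decidable (Spec_merge_two_fragments_py text1 text2 out) := by unfold Spec_merge_two_fragments_py; infer_instance

-- ===== CLAIM (what is proved, stated in full; the proofs are below) =====
def Claim_equal_merge_two_fragments_py : Prop := ∀ (text1 : String) (text2 : String), Dom_merge_two_fragments_py text1 text2 → Spec_merge_two_fragments_py text1 text2 (merge_two_fragments_py text1 text2)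

-- ===== LEMMAS AND PROOFS =====

-- k is a (proper, possibly empty) border of s: the length-k prefix equals the length-k suffix
def pvBord (s : List Char) (k : Nat) : Prop := k < s.length ∧ s.take k = s.drop (s.length - k)

def pvMaxBord (s : List Char) : Nat :=
  Nat.findGreatest (fun k => s.take k = s.drop (s.length - k)) (s.length - 1)

theorem pvBord_zero {s : List Char} (h : s ≠ []) : pvBord s 0 := by
  exact ⟨List.length_pos_iff.mpr h, by rw [List.take_zero, Nat.sub_zero, List.drop_length]⟩

theorem pvBord_lt {s : List Char} {k : Nat} (h : pvBord s k) : k < s.length := h.1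

theorem pvMaxBord_isBord {s : List Char} (h : s ≠ []) : pvBord s (pvMaxBord s) := by
  have hlen : 0 < s.length := List.length_pos_iff.mpr h
  have hspec : s.take (pvMaxBord s) = s.drop (s.length - pvMaxBord s) :=
    Nat.findGreatest_spec (P := fun k => s.take k = s.drop (s.length - k)) (m := 0) (Nat.zero_le _)
      (by show List.take 0 s = _; rw [List.take_zero, Nat.sub_zero, List.drop_length])
  have hle : pvMaxBord s ≤ s.length - 1 :=
    Nat.findGreatest_le (P := fun k => s.take k = s.drop (s.length - k)) (s.length - 1)
  exact ⟨by omega, hspec⟩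

theorem pvLe_maxBord {s : List Char} {k : Nat} (h : pvBord s k) : k ≤ pvMaxBord s := by
  exact Nat.le_findGreatest (by have := h.1; omega) h.2

theorem pvBord_take {s : List Char} {k j : Nat} (hk : pvBord s k) (hj : j < k) :
    (pvBord s j ↔ pvBord (s.take k) j) := by
  obtain ⟨hklen, hkeq⟩ := hk
  have hlen : (s.take k).length = k := by rw [List.length_take]; omega
  have htake : (s.take k).take j = s.take j := by rw [List.take_take]; congr 1; omega
  have hdrop : (s.take k).drop ((s.take k).length - j) = s.drop (s.length - j) := by
    rw [hlen, hkeq, List.drop_drop]; congr 1; omega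
  have key : pvBord (s.take k) j ↔ (j < k ∧ s.take j = s.drop (s.length - j)) := by
    unfold pvBord; rw [htake, hdrop, hlen]
  rw [key]; unfold pvBord
  exact ⟨fun ⟨_, h2⟩ => ⟨hj, h2⟩, fun ⟨_, h2⟩ => ⟨by omega, h2⟩⟩

theorem pvGetD_take {s : List Char} {i j : Nat} (h : j < i) (d : Char) :
    (s.take i).getD j d = s.getD j d := by
  simp [List.getD_eq_getElem?_getD, h]

theorem pvBord_append {s : List Char} {c : Char} {b : Nat} (hb : b < s.length) :
    pvBord (s ++ [c]) (b + 1) ↔ pvBord s b ∧ s.getD b ' ' = c := by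
  have hlen : (s ++ [c]).length = s.length + 1 := by simp
  have hget : s[b]? = some (s.getD b ' ') := by
    rw [List.getD_eq_getElem?_getD, List.getElem?_eq_getElem hb]; rfl
  have ht : (s ++ [c]).take (b + 1) = s.take b ++ [s.getD b ' '] := by
    rw [List.take_append_of_le_length (by omega), List.take_add_one, hget]; rfl
  have hd : (s ++ [c]).drop ((s ++ [c]).length - (b + 1)) = s.drop (s.length - b) ++ [c] := by
    rw [hlen, show s.length + 1 - (b + 1) = s.length - b by omega, List.drop_append,
      show s.length - b - s.length = 0 by omega]
    rfl
  unfold pvBord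
  rw [ht, hd, hlen]
  constructor
  · rintro ⟨h1, h2⟩
    obtain ⟨e1, e2⟩ := List.append_inj h2 (by simp [List.length_take, List.length_drop]; omega)
    exact ⟨⟨hb, e1⟩, by injection e2⟩
  · rintro ⟨⟨h1, h2⟩, h3⟩
    exact ⟨by omega, by rw [h2, h3]⟩

-- the while-loop walks the border chain: its result is the largest border of s.take i
-- (at most the start value) that is followed by c — or 0
theorem pvKmpWhile_spec (s : List Char) (pi : List Nat) (c : Char) (i : Nat)
    (hi : i ≤ s.length) (hi1 : 1 ≤ i)
    (hpi : ∀ j, 1 ≤ j → j ≤ i → pi.getD (j - 1) 0 = pvMaxBord (s.take j)) :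
    ∀ fuel k, k ≤ fuel → pvBord (s.take i) k →
      pvBord (s.take i) (pvKmpWhile s pi c fuel k) ∧
      (s.getD (pvKmpWhile s pi c fuel k) ' ' = c ∨ pvKmpWhile s pi c fuel k = 0) ∧
      (∀ b, pvBord (s.take i) b → b ≤ k → s.getD b ' ' = c → b ≤ pvKmpWhile s pi c fuel k) := by
  intro fuel
  induction fuel with
  | zero =>
    intro k hk hbord
    have hk0 : k = 0 := by omega
    subst hk0
    have hne : s.take i ≠ [] := by
      intro e
      have := congrArg List.length e
      rw [List.length_take, List.length_nil] at this
      omega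
    exact ⟨hbord, Or.inr rfl, fun b _ hble _ => by omega⟩
  | succ fuel ih =>
    intro k hk hbord
    simp only [pvKmpWhile]
    by_cases hcond : k ≠ 0 ∧ s.getD k ' ' ≠ c
    · rw [if_pos hcond]
      obtain ⟨hk0, hkc⟩ := hcond
      have hk1 : 1 ≤ k := Nat.one_le_iff_ne_zero.mpr hk0
      have hki : k < i := by
        have := pvBord_lt hbord
        rw [List.length_take] at this
        omega
      have hpik : pi.getD (k - 1) 0 = pvMaxBord (s.take k) := hpi k hk1 (by omega)
      have htk : (s.take i).take k = s.take k := by rw [List.take_take]; congr 1; omega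
      have hkne : s.take k ≠ [] := by
        intro e
        have := congrArg List.length e
        rw [List.length_take, List.length_nil] at this
        omega
      have hmb := pvMaxBord_isBord hkne
      have hmlt : pvMaxBord (s.take k) < k := by
        have := pvBord_lt hmb
        rw [List.length_take] at this
        omega
      have hbord' : pvBord (s.take i) (pvMaxBord (s.take k)) := by
        rw [pvBord_take hbord hmlt, htk]
        exact hmb
      obtain ⟨r1, r2, r3⟩ := ih (pi.getD (k - 1) 0) (by rw [hpik]; omega) (by rw [hpik]; exact hbord')
      refine ⟨r1, r2, ?_⟩
      intro b hb hble hbc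
      have hbk : b ≠ k := fun e => hkc (e ▸ hbc)
      have hblt : b < k := by omega
      have hbtk : pvBord (s.take k) b := by rw [← htk, ← pvBord_take hbord hblt]; exact hb
      have hbm : b ≤ pvMaxBord (s.take k) := pvLe_maxBord hbtk
      exact r3 b hb (by rw [hpik]; omega) hbc
    · rw [if_neg hcond]
      have hor : s.getD k ' ' = c ∨ k = 0 := by
        by_cases h0 : k = 0
        · exact Or.inr h0
        · by_cases hc2 : s.getD k ' ' = c
          · exact Or.inl hc2
          · exact absurd ⟨h0, hc2⟩ hcond
      exact ⟨hbord, hor, fun b _ hble _ => hble⟩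

-- one iteration of the scan turns the max border of s.take i into that of s.take (i+1)
theorem pvKmpStep_spec (s : List Char) (pi : List Nat) (i : Nat)
    (hi : i < s.length) (hi1 : 1 ≤ i)
    (hpi : ∀ j, 1 ≤ j → j ≤ i → pi.getD (j - 1) 0 = pvMaxBord (s.take j)) :
    (let c := s.getD i ' '
     let w := pvKmpWhile s pi c (pvMaxBord (s.take i)) (pvMaxBord (s.take i))
     (if s.getD w ' ' = c then w + 1 else w) = pvMaxBord (s.take (i + 1))) := by
  intro c w
  have hilen : (s.take i).length = i := by rw [List.length_take]; omega
  have hine : s.take i ≠ [] := by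
    intro e; have := congrArg List.length e; rw [hilen] at this; simp at this; omega
  have hb0 : pvBord (s.take i) (pvMaxBord (s.take i)) := pvMaxBord_isBord hine
  obtain ⟨w1, w2, w3⟩ :=
    pvKmpWhile_spec s pi c i (by omega) hi1 hpi (pvMaxBord (s.take i)) (pvMaxBord (s.take i))
      le_rfl hb0
  have hwi : w < i := by have := pvBord_lt w1; rw [hilen] at this; exact this
  have hc : c = s.getD i ' ' := rfl
  have hsucc : s.take (i + 1) = s.take i ++ [c] := by
    rw [List.take_add_one, List.getElem?_eq_getElem hi]
    rw [hc, List.getD_eq_getElem?_getD, List.getElem?_eq_getElem hi]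
    rfl
  have hne1 : s.take (i + 1) ≠ [] := by rw [hsucc]; simp
  apply Nat.le_antisymm
  · apply pvLe_maxBord
    by_cases hifc : s.getD w ' ' = c
    · rw [if_pos hifc, hsucc]
      refine (pvBord_append (by rw [hilen]; exact hwi)).mpr ⟨w1, ?_⟩
      rw [pvGetD_take hwi]
      exact hifc
    · rw [if_neg hifc]
      have hw0 : w = 0 := by rcases w2 with h | h; exact absurd h hifc; exact h
      rw [hw0]
      exact pvBord_zero hne1
  · have hMb := pvMaxBord_isBord hne1
    rcases Nat.eq_zero_or_pos (pvMaxBord (s.take (i + 1))) with hM0 | hMpos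
    · rw [hM0]; exact Nat.zero_le _
    · obtain ⟨b, hMb1⟩ : ∃ b, pvMaxBord (s.take (i + 1)) = b + 1 :=
        ⟨pvMaxBord (s.take (i + 1)) - 1, by omega⟩
      rw [hMb1, hsucc] at hMb
      have hbi : b < (s.take i).length := by
        have h1 := pvBord_lt hMb
        rw [List.length_append, hilen] at h1
        simp at h1
        rw [hilen]
        omega
      obtain ⟨hbB, hbc⟩ := (pvBord_append hbi).mp hMb
      have hbc' : s.getD b ' ' = c := by
        rw [← pvGetD_take (show b < i by rw [hilen] at hbi; exact hbi)]
        exact hbc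
      have hbk0 : b ≤ pvMaxBord (s.take i) := pvLe_maxBord hbB
      have hbw : b ≤ w := w3 b hbB hbk0 hbc'
      rw [hMb1]
      by_cases hifc : s.getD w ' ' = c
      · rw [if_pos hifc]; omega
      · rw [if_neg hifc]
        have hw0 : w = 0 := by rcases w2 with h | h; exact absurd h hifc; exact h
        have hb0' : b = 0 := by omega
        rw [hb0'] at hbc'
        rw [hw0] at hifc
        exact absurd hbc' hifc

-- the scan's step function, named for the loop invariant
def pvStep (s : List Char) (st : List Nat × Nat) (i : Nat) : List Nat × Nat :=
  let c := s.getD i ' '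
  let w := pvKmpWhile s st.1 c st.2 st.2
  let k := if s.getD w ' ' = c then w + 1 else w
  (st.1.set i k, k)

theorem pvKmpScan_eq (s : List Char) :
    pvKmpScan s = (List.range' 1 (s.length - 1)).foldl (pvStep s) (List.replicate s.length 0, 0) :=
  rfl

theorem pvScan_inv (s : List Char) (hs : s ≠ []) :
    ∀ m, m ≤ s.length - 1 →
      ((List.range' 1 m).foldl (pvStep s) (List.replicate s.length 0, 0)).2 =
          pvMaxBord (s.take (m + 1)) ∧
      ((List.range' 1 m).foldl (pvStep s) (List.replicate s.length 0, 0)).1.length = s.length ∧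
      ∀ j, 1 ≤ j → j ≤ m + 1 →
        ((List.range' 1 m).foldl (pvStep s) (List.replicate s.length 0, 0)).1.getD (j - 1) 0 =
          pvMaxBord (s.take j) := by
  have hn : 0 < s.length := List.length_pos_iff.mpr hs
  have hone : pvMaxBord (s.take 1) = 0 := by
    unfold pvMaxBord
    rw [List.length_take, show min 1 s.length = 1 by omega, Nat.sub_self]
    exact Nat.findGreatest_zero
  intro m
  induction m with
  | zero =>
    intro _
    rw [List.range'_zero, List.foldl_nil]
    refine ⟨hone.symm, by simp, ?_⟩
    intro j hj1 hj2
    have hj : j = 1 := by omega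
    subst hj
    rw [List.getD_replicate _ (by omega)]
    exact hone.symm
  | succ m ih =>
    intro hm
    obtain ⟨ih1, ih2, ih3⟩ := ih (by omega)
    have hconcat : List.range' 1 (m + 1) = List.range' 1 m ++ [m + 1] := by
      rw [List.range'_concat, one_mul, Nat.add_comm 1 m]
    rw [hconcat, List.foldl_append, List.foldl_cons, List.foldl_nil]
    have hi : m + 1 < s.length := by omega
    have hstep := pvKmpStep_spec s
      ((List.range' 1 m).foldl (pvStep s) (List.replicate s.length 0, 0)).1 (m + 1) hi (by omega)
      (fun j hj1 hj2 => ih3 j hj1 hj2)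
    simp only at hstep
    simp only [pvStep, ih1]
    refine ⟨hstep, by rw [List.length_set]; exact ih2, ?_⟩
    intro j hj1 hj2
    by_cases hje : j = m + 2
    · subst hje
      have hlt : m + 1 < ((List.range' 1 m).foldl (pvStep s)
          (List.replicate s.length 0, 0)).1.length := by rw [ih2]; exact hi
      show _ = pvMaxBord (s.take (m + 2))
      rw [show m + 2 - 1 = m + 1 by omega]
      rw [List.getD_eq_getElem?_getD, List.getElem?_set, if_pos rfl, if_pos hlt]
      exact hstep
    · have hjle : j ≤ m + 1 := by omega
      rw [List.getD_eq_getElem?_getD, List.getElem?_set, if_neg (by omega),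
        ← List.getD_eq_getElem?_getD]
      exact ih3 j hj1 hjle

theorem pvKmpScan_spec (s : List Char) (hs : s ≠ []) :
    (pvKmpScan s).2 = pvMaxBord s ∧ (pvKmpScan s).1.length = s.length ∧
      (∀ j, 1 ≤ j → j ≤ s.length → (pvKmpScan s).1.getD (j - 1) 0 = pvMaxBord (s.take j)) := by
  have hn : 0 < s.length := List.length_pos_iff.mpr hs
  obtain ⟨h1, h2, h3⟩ := pvScan_inv s hs (s.length - 1) le_rfl
  rw [pvKmpScan_eq]
  rw [show s.length - 1 + 1 = s.length by omega] at h1 h3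
  rw [List.take_length] at h1
  refine ⟨h1, h2, ?_⟩
  intro j hj1 hj2
  rw [h3 j hj1 hj2]

theorem pvChainDown_spec (s : List Char) (pi : List Nat) (cap : Nat)
    (hpi : ∀ j, 1 ≤ j → j ≤ s.length → pi.getD (j - 1) 0 = pvMaxBord (s.take j)) :
    ∀ fuel k, k ≤ fuel → pvBord s k →
      pvBord s (pvChainDown pi cap fuel k) ∧ pvChainDown pi cap fuel k ≤ cap ∧
      (∀ b, pvBord s b → b ≤ cap → b ≤ k → b ≤ pvChainDown pi cap fuel k) := by
  intro fuel
  induction fuel with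
  | zero =>
    intro k hk hbord
    have hk0 : k = 0 := by omega
    subst hk0
    exact ⟨hbord, Nat.zero_le _, fun b _ _ hbk => by omega⟩
  | succ fuel ih =>
    intro k hk hbord
    simp only [pvChainDown]
    by_cases hc : cap < k
    · rw [if_pos hc]
      have hk1 : 1 ≤ k := by omega
      have hklen : k < s.length := pvBord_lt hbord
      have hpik : pi.getD (k - 1) 0 = pvMaxBord (s.take k) := hpi k hk1 (by omega)
      have hkne : s.take k ≠ [] := by
        intro e
        have := congrArg List.length e
        rw [List.length_take, List.length_nil] at this
        omega
      have hmb := pvMaxBord_isBord hkne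
      have hmlt : pvMaxBord (s.take k) < k := by
        have := pvBord_lt hmb
        rw [List.length_take] at this
        omega
      have hb' : pvBord s (pvMaxBord (s.take k)) := by
        rw [pvBord_take hbord hmlt]
        exact hmb
      obtain ⟨r1, r2, r3⟩ := ih (pi.getD (k - 1) 0) (by rw [hpik]; omega) (by rw [hpik]; exact hb')
      refine ⟨r1, r2, fun b hb hbcap hbk => ?_⟩
      have hblt : b < k := by omega
      have hbtk : pvBord (s.take k) b := by rw [← pvBord_take hbord hblt]; exact hb
      exact r3 b hb hbcap (by rw [hpik]; exact pvLe_maxBord hbtk)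
    · rw [if_neg hc]
      exact ⟨hbord, by omega, fun b _ _ hbk => hbk⟩

-- borders of  y ++ '\x00' :: x  are exactly the case-insensitive suffix/prefix overlaps of x, y
theorem pvBord_sep {x y : List Char} (hx : '\x00' ∉ x) (hy : '\x00' ∉ y) (k : Nat) :
    pvBord (y ++ '\x00' :: x) k ↔
      k ≤ x.length ∧ k ≤ y.length ∧ y.take k = x.drop (x.length - k) := by
  set s := y ++ '\x00' :: x with hs
  have hn : s.length = y.length + x.length + 1 := by simp [hs]; omega
  have hsep : s[y.length]? = some '\x00' := by
    rw [hs, List.getElem?_append_right (le_refl _), Nat.sub_self]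
    rfl
  have hyget : ∀ j, j < y.length → s[j]? = y[j]? := fun j hj => by
    rw [hs, List.getElem?_append_left hj]
  have hxget : ∀ j, y.length < j → j < s.length → s[j]? = x[j - y.length - 1]? := fun j h1 h2 => by
    rw [hs, List.getElem?_append_right (by omega)]
    have : j - y.length = (j - y.length - 1) + 1 := by omega
    rw [this]
    rfl
  constructor
  · rintro ⟨hk, heq⟩
    have hky : k ≤ y.length := by
      by_contra hc
      rw [not_le] at hc
      have e := congrArg (fun l => l[y.length]?) heq
      simp only at e
      rw [List.getElem?_take, if_pos hc, hsep, List.getElem?_drop] at e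
      set p := s.length - k + y.length with hp
      have hp1 : y.length < p := by omega
      have hp2 : p < s.length := by omega
      rw [hxget p hp1 hp2] at e
      have hidx : p - y.length - 1 < x.length := by omega
      rw [List.getElem?_eq_getElem hidx] at e
      have : x[p - y.length - 1] ∈ x := List.getElem_mem hidx
      rw [← Option.some_inj.mp e] at this
      exact hx this
    have hkx : k ≤ x.length := by
      by_contra hc
      rw [not_le] at hc
      set j := k - x.length - 1 with hj
      have hjk : j < k := by omega
      have hjy : j < y.length := by omega
      have e := congrArg (fun l => l[j]?) heq
      simp only at e
      rw [List.getElem?_take, if_pos hjk, List.getElem?_drop] at e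
      have : s.length - k + j = y.length := by omega
      rw [this, hsep, hyget j hjy] at e
      have hjy' : j < y.length := hjy
      rw [List.getElem?_eq_getElem hjy'] at e
      have : y[j] ∈ y := List.getElem_mem hjy'
      rw [Option.some_inj.mp e] at this
      exact hy this
    refine ⟨hkx, hky, ?_⟩
    have ht : s.take k = y.take k := by rw [hs, List.take_append_of_le_length hky]
    have hd : s.drop (s.length - k) = x.drop (x.length - k) := by
      have h1 : s.length - k = y.length + ((x.length - k) + 1) := by omega
      rw [h1, hs, List.drop_append, List.drop_eq_nil_of_le (by omega), List.nil_append,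
        show y.length + (x.length - k + 1) - y.length = (x.length - k) + 1 by omega,
        List.drop_succ_cons]
    rw [ht, hd] at heq
    exact heq
  · rintro ⟨hkx, hky, heq⟩
    have hk : k < s.length := by omega
    have ht : s.take k = y.take k := by rw [hs, List.take_append_of_le_length hky]
    have hd : s.drop (s.length - k) = x.drop (x.length - k) := by
      have h1 : s.length - k = y.length + ((x.length - k) + 1) := by omega
      rw [h1, hs, List.drop_append, List.drop_eq_nil_of_le (by omega), List.nil_append,
        show y.length + (x.length - k + 1) - y.length = (x.length - k) + 1 by omega,
        List.drop_succ_cons]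
    exact ⟨hk, by rw [ht, hd]; exact heq⟩


theorem pvBestOverlap_spec (a b : List Char) (ha : '\x00' ∉ a) (hb : '\x00' ∉ b)
    (cap : Nat) (hcap : cap ≤ min a.length b.length) :
    pvBestOverlap a b cap = Nat.findGreatest (fun k => b.take k = a.drop (a.length - k)) cap := by
  have hs : (b ++ '\x00' :: a) ≠ [] := by simp
  obtain ⟨h1, h2, h3⟩ := pvKmpScan_spec (b ++ '\x00' :: a) hs
  have hbord : pvBord (b ++ '\x00' :: a) (pvKmpScan (b ++ '\x00' :: a)).2 := by
    rw [h1]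
    exact pvMaxBord_isBord hs
  obtain ⟨c1, c2, c3⟩ := pvChainDown_spec (b ++ '\x00' :: a) (pvKmpScan (b ++ '\x00' :: a)).1
    cap h3 (pvKmpScan (b ++ '\x00' :: a)).2 (pvKmpScan (b ++ '\x00' :: a)).2 le_rfl hbord
  show pvChainDown (pvKmpScan (b ++ '\x00' :: a)).1 cap (pvKmpScan (b ++ '\x00' :: a)).2
      (pvKmpScan (b ++ '\x00' :: a)).2 = _
  refine (Nat.findGreatest_eq_iff.mpr ⟨c2, ?_, ?_⟩).symm
  · intro hw0
    exact ((pvBord_sep ha hb _).mp c1).2.2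
  · intro m hwm hmcap hQ
    have hbm : pvBord (b ++ '\x00' :: a) m :=
      (pvBord_sep ha hb m).mpr ⟨by omega, by omega, hQ⟩
    have := c3 m hbm hmcap (by rw [h1]; exact pvLe_maxBord hbm)
    omega

-- A-side: the descending range and the first hit of the descending scan
theorem pvPyRange_desc_succ (c : Nat) :
    PySem.List.pyRange ((c + 1 : Nat) : Int) 0 (-1) =
      ((c + 1 : Nat) : Int) :: PySem.List.pyRange (c : Int) 0 (-1) := by
  simp only [PySem.List.pyRange]
  norm_num
  have h : (if 0 < c then c else 0) = c := by split <;> omega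
  rw [h, List.range_succ_eq_map, List.map_cons, List.map_map]
  refine List.cons_eq_cons.mpr ⟨by norm_num, List.map_congr_left (fun a _ => ?_)⟩
  simp only [Function.comp_apply]
  push_cast
  ring

theorem pvPyRange_desc_zero : PySem.List.pyRange ((0 : Nat) : Int) 0 (-1) = [] := by
  decide

theorem pvLoopA_spec (t1 t2 : String) (c : Nat) :
    pvLoopA t1 t2 (PySem.List.pyRange (c : Int) 0 (-1)) =
      (if Nat.findGreatest (fun k => pvCondA t1 t2 (k : Int) = true) c = 0 then none
       else some (t1 ++ PySem.Str.slice t2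
         (some (Nat.findGreatest (fun k => pvCondA t1 t2 (k : Int) = true) c : Int)) none)) := by
  induction c with
  | zero => rw [pvPyRange_desc_zero]; simp [pvLoopA]
  | succ n ih =>
    rw [pvPyRange_desc_succ]
    rw [Nat.findGreatest_succ]
    by_cases hp : pvCondA t1 t2 ((n + 1 : Nat) : Int) = true
    · rw [pvLoopA, if_pos hp, if_pos hp, if_neg (by omega)]
    · rw [pvLoopA, if_neg hp, if_neg hp, ih]

theorem pvCondA_iff (t1 t2 : String) (k : Nat) (hk : 1 ≤ k) :
    (pvCondA t1 t2 (k : Int) = true) ↔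
      (PySem.Chars.lower t2.toList).take k =
        (PySem.Chars.lower t1.toList).drop ((PySem.Chars.lower t1.toList).length - k) := by
  unfold pvCondA
  rw [beq_iff_eq, ← String.toList_inj]
  rw [PySem.Str.toList_lower, PySem.Str.toList_lower, PySem.Str.toList_slice, PySem.Str.toList_slice]
  rw [PySem.Chars.slice_eq_listSlice, PySem.Chars.slice_eq_listSlice]
  rw [PySem.List.slice_from_neg_natCast _ k hk, PySem.List.slice_to_natCast]
  simp only [PySem.Chars.lower, List.map_take, List.map_drop, List.length_map]
  exact eq_comm


theorem pvFindGreatest_congr (P Q : Nat → Prop) [DecidablePred P] [DecidablePred Q] (c : Nat)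
    (h : ∀ k, 1 ≤ k → k ≤ c → (P k ↔ Q k)) : Nat.findGreatest P c = Nat.findGreatest Q c := by
  induction c with
  | zero => simp
  | succ n ih =>
    rw [Nat.findGreatest_succ, Nat.findGreatest_succ]
    have hiff := h (n + 1) (by omega) (by omega)
    by_cases hp : P (n + 1)
    · rw [if_pos hp, if_pos (hiff.mp hp)]
    · rw [if_neg hp, if_neg (fun hq => hp (hiff.mpr hq))]
      exact ih (fun k h1 h2 => h k h1 (by omega))

theorem pvSep_not_mem (t : String) (h : pvDomStr t = true) :
    '\x00' ∉ PySem.Chars.lower t.toList := by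
  intro hmem
  simp only [PySem.Chars.lower, List.mem_map] at hmem
  obtain ⟨ch, hch, heq⟩ := hmem
  have hdom : pvDomChar ch = true := by
    unfold pvDomStr at h; rw [List.all_eq_true] at h; exact h ch hch
  unfold pvDomChar at hdom
  simp only [Bool.or_eq_true, Bool.and_eq_true, decide_eq_true_eq, beq_iff_eq] at hdom
  unfold PySem.Chars.lowerChar at heq
  by_cases hu : PySem.Chars.isupper ch = true
  · rw [if_pos hu] at heq
    have hval : (Char.ofNat (ch.toNat + 32)).toNat = ch.toNat + 32 := by
      rw [Char.toNat_ofNat, if_pos (Or.inl (by omega))]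
    have h0 := congrArg Char.toNat heq
    rw [hval] at h0
    have : Char.toNat '\x00' = 0 := by decide
    omega
  · rw [if_neg hu] at heq
    have h0 := congrArg Char.toNat heq
    have : Char.toNat '\x00' = 0 := by decide
    omega

-- ===== VERDICT (by name: the statement is the Claim_ definition above) =====
theorem merge_two_fragments_py_spec : Claim_equal_merge_two_fragments_py := by
  intro t1 t2 hdom
  unfold Spec_merge_two_fragments_py
  have hdom' : pvDomStr t1 = true ∧ pvDomStr t2 = true := by
    unfold Dom_merge_two_fragments_py at hdom
    simpa using hdom
  have hsepa := pvSep_not_mem t1 hdom'.1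
  have hsepb := pvSep_not_mem t2 hdom'.2
  have hla : (PySem.Chars.lower t1.toList).length = t1.toList.length := by
    simp [PySem.Chars.lower]
  have hlb : (PySem.Chars.lower t2.toList).length = t2.toList.length := by
    simp [PySem.Chars.lower]
  have hcaple : min (PySem.Chars.lower t1.toList).length (PySem.Chars.lower t2.toList).length / 2 ≤
      min (PySem.Chars.lower t1.toList).length (PySem.Chars.lower t2.toList).length :=
    Nat.div_le_self _ _
  have hmo : PySem.Int.floordiv (min (PySem.Str.len t1) (PySem.Str.len t2)) 2 =
      ((min (PySem.Chars.lower t1.toList).length (PySem.Chars.lower t2.toList).length / 2 : Nat) :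
        Int) := by
    rw [PySem.Str.len_eq, PySem.Str.len_eq, hla, hlb, ← Nat.cast_min]
    exact_mod_cast PySem.Int.floordiv_natCast (min t1.toList.length t2.toList.length) 2
  simp only [merge_two_fragments_py, merge_two_fragments_py_alt]
  rw [hmo, pvLoopA_spec, pvLoopA_spec]
  rw [pvFindGreatest_congr (fun k => pvCondA t1 t2 (k : Int) = true)
    (fun k => (PySem.Chars.lower t2.toList).take k =
      (PySem.Chars.lower t1.toList).drop ((PySem.Chars.lower t1.toList).length - k)) _
    (fun k h1 _ => pvCondA_iff t1 t2 k h1)]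
  rw [pvFindGreatest_congr (fun k => pvCondA t2 t1 (k : Int) = true)
    (fun k => (PySem.Chars.lower t1.toList).take k =
      (PySem.Chars.lower t2.toList).drop ((PySem.Chars.lower t2.toList).length - k)) _
    (fun k h1 _ => pvCondA_iff t2 t1 k h1)]
  rw [pvBestOverlap_spec _ _ hsepa hsepb _ hcaple,
    pvBestOverlap_spec _ _ hsepb hsepa
      (min (PySem.Chars.lower t1.toList).length (PySem.Chars.lower t2.toList).length / 2)
      (by rw [Nat.min_comm (PySem.Chars.lower t2.toList).length
          (PySem.Chars.lower t1.toList).length]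
          exact hcaple)]
  set m1 := Nat.findGreatest
    (fun k => (PySem.Chars.lower t2.toList).take k =
      (PySem.Chars.lower t1.toList).drop ((PySem.Chars.lower t1.toList).length - k))
    (min (PySem.Chars.lower t1.toList).length (PySem.Chars.lower t2.toList).length / 2) with hm1def
  set m2 := Nat.findGreatest
    (fun k => (PySem.Chars.lower t1.toList).take k =
      (PySem.Chars.lower t2.toList).drop ((PySem.Chars.lower t2.toList).length - k))
    (min (PySem.Chars.lower t1.toList).length (PySem.Chars.lower t2.toList).length / 2) with hm2def
  by_cases hm1 : m1 = 0
  · rw [if_pos hm1]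
    simp only [hm1, ne_eq, not_true_eq_false, if_false]
    by_cases hm2 : m2 = 0
    · rw [if_pos hm2]
      simp only [hm2, not_true_eq_false, if_false]
      rw [PySem.Str.isIn_eq, PySem.Str.isIn_eq, PySem.Str.toList_lower, PySem.Str.toList_lower]
    · rw [if_neg hm2]
      simp only [hm2, not_false_eq_true, if_true]
      rw [← String.toList_inj]
      simp only [String.toList_append, PySem.Str.toList_slice, PySem.Chars.slice_eq_listSlice,
        PySem.List.slice_from_natCast, String.toList_ofList]
  · rw [if_neg hm1]
    simp only [ne_eq, hm1, not_false_eq_true, if_true]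
    rw [← String.toList_inj]
    simp only [String.toList_append, PySem.Str.toList_slice, PySem.Chars.slice_eq_listSlice,
      PySem.List.slice_from_natCast, String.toList_ofList]
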